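-- pv_equiv track=rewrite | github.com/nanonyme/simplepreprocessor | simplepreprocessor.py | calculate_ignore
-- ===== SOURCE A (Python) =====
-- def calculate_ignore(defines, constraints):
--     defines = set(defines)
--     for key, value in constraints:
--         if value and key not in defines:
--             return True
--         if not value and key in defines:
--             return True
--     return False
-- ===== SOURCE B (Python) =====
-- def calculate_ignore(defines, constraints):
--     required_present = {key for key, value in constraints if value}
--     required_absent = {key for key, value in constraints if not value}
--     defines = set(defines)
--     return not (required_present <= defines and required_absent.isdisjoint(defines))
-- ===== Notes on version B (the rewrite author's own statement) =====
-- stated objective: alternative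
-- what changed: Replaced the per-constraint branch-and-early-return loop by partitioning the constraints into required-present and required-absent key sets and deciding with one subset test and one disjointness test.
import Mathlib
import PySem

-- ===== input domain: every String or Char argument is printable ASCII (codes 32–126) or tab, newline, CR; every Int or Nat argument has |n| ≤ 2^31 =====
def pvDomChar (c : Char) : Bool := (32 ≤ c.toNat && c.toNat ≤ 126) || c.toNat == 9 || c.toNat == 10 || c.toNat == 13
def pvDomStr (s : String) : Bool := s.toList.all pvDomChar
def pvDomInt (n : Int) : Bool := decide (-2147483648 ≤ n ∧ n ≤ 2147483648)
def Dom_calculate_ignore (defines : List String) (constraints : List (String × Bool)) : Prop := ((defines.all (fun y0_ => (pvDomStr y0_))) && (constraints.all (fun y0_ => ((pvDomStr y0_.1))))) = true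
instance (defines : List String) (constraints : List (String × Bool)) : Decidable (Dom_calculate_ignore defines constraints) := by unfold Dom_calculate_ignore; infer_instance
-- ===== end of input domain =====

-- B replaces A's per-constraint early-return loop by two partitioned key sets and a
-- subset + disjointness test (objective: alternative decomposition, same cost).

-- ===== PORT A =====
-- the 'for key, value in constraints' loop with its two early returns
def pvCalcALoop (ds : PySem.Set String) : List (String × Bool) → Bool
  | [] => false
  | (key, value) :: rest =>
    if value && !(PySem.Set.contains ds key) then true
    else if !value && PySem.Set.contains ds key then true
    else pvCalcALoop ds rest

def calculate_ignore (defines : List String) (constraints : List (String × Bool)) : Bool :=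
  pvCalcALoop (PySem.Set.ofList defines) constraints

-- ===== PORT B =====
def calculate_ignore_alt (defines : List String) (constraints : List (String × Bool)) : Bool :=
  let required_present : PySem.Set String :=
    PySem.Set.ofList ((constraints.filter (fun kv => kv.2)).map Prod.fst)
  let required_absent : PySem.Set String :=
    PySem.Set.ofList ((constraints.filter (fun kv => !kv.2)).map Prod.fst)
  let ds : PySem.Set String := PySem.Set.ofList defines
  !(PySem.Set.issubset required_present ds && PySem.Set.isdisjoint required_absent ds)

-- ===== PRECONDITION & SPEC =====
def Spec_calculate_ignore (defines : List String) (constraints : List (String × Bool)) (out : Bool) : Prop := out = calculate_ignore_alt defines constraints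
instance (defines : List String) (constraints : List (String × Bool)) (out : Bool) : Decidable (Spec_calculate_ignore defines constraints out) := by unfold Spec_calculate_ignore; infer_instance

-- ===== CLAIM (what is proved, stated in full; the proofs are below) =====
def Claim_equal_calculate_ignore : Prop := ∀ (defines : List String) (constraints : List (String × Bool)), Dom_calculate_ignore defines constraints → Spec_calculate_ignore defines constraints (calculate_ignore defines constraints)

-- ===== LEMMAS AND PROOFS =====

-- A's loop returns whether some constraint is violated
theorem pvCalcALoop_eq_any (ds : PySem.Set String) (cs : List (String × Bool)) :
    pvCalcALoop ds cs
      = cs.any (fun kv => if kv.2 then !PySem.Set.contains ds kv.1 else PySem.Set.contains ds kv.1) := by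
  induction cs with
  | nil => rfl
  | cons kv rest ih =>
    obtain ⟨k, v⟩ := kv
    cases v <;> simp [pvCalcALoop, ih]

theorem pvCalcALoop_eq_setalg (defines : List String) (constraints : List (String × Bool)) :
    pvCalcALoop (PySem.Set.ofList defines) constraints
      = !(PySem.Set.issubset (PySem.Set.ofList ((constraints.filter (fun kv => kv.2)).map Prod.fst)) (PySem.Set.ofList defines)
          && PySem.Set.isdisjoint (PySem.Set.ofList ((constraints.filter (fun kv => !kv.2)).map Prod.fst)) (PySem.Set.ofList defines)) := by
  rw [pvCalcALoop_eq_any]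
  cases hsub : PySem.Set.issubset (PySem.Set.ofList ((constraints.filter (fun kv => kv.2)).map Prod.fst)) (PySem.Set.ofList defines) with
  | false =>
    have h : ¬ ∀ x ∈ PySem.Set.ofList ((constraints.filter (fun kv => kv.2)).map Prod.fst), x ∈ PySem.Set.ofList defines := by
      intro hall
      simp [(PySem.Set.issubset_iff _ _).mpr hall] at hsub
    push Not at h
    obtain ⟨k, hk, hnd⟩ := h
    simp only [PySem.Set.mem_ofList, List.mem_map, List.mem_filter] at hk hnd
    obtain ⟨⟨k', v⟩, ⟨hmem, hv⟩, rfl⟩ := hk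
    simp only [Bool.false_and, Bool.not_false, List.any_eq_true]
    refine ⟨(k', v), hmem, ?_⟩
    simp at hv
    simp [hv, PySem.Set.mem_ofList, hnd]
  | true =>
    cases hdis : PySem.Set.isdisjoint (PySem.Set.ofList ((constraints.filter (fun kv => !kv.2)).map Prod.fst)) (PySem.Set.ofList defines) with
    | false =>
      have h : ¬ ∀ x ∈ PySem.Set.ofList ((constraints.filter (fun kv => !kv.2)).map Prod.fst), x ∉ PySem.Set.ofList defines := by
        intro hall
        simp [(PySem.Set.isdisjoint_iff _ _).mpr hall] at hdis
      push Not at h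
      obtain ⟨k, hk, hd⟩ := h
      simp only [PySem.Set.mem_ofList, List.mem_map, List.mem_filter] at hk hd
      obtain ⟨⟨k', v⟩, ⟨hmem, hv⟩, rfl⟩ := hk
      simp only [Bool.true_and, Bool.not_false, List.any_eq_true]
      refine ⟨(k', v), hmem, ?_⟩
      simp at hv
      simp [hv, PySem.Set.mem_ofList, hd]
    | true =>
      have hs := (PySem.Set.issubset_iff _ _).mp hsub
      have hd := (PySem.Set.isdisjoint_iff _ _).mp hdis
      simp only [PySem.Set.mem_ofList, List.mem_map, List.mem_filter] at hs hd
      simp only [Bool.true_and, Bool.not_true, List.any_eq_false]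
      rintro ⟨k, v⟩ hmem
      cases v
      · simpa [PySem.Set.contains_iff, PySem.Set.mem_ofList] using
          hd k ⟨(k, false), ⟨hmem, rfl⟩, rfl⟩
      · simpa [PySem.Set.contains_iff, PySem.Set.mem_ofList] using
          hs k ⟨(k, true), ⟨hmem, rfl⟩, rfl⟩

-- ===== VERDICT (by name: the statement is the Claim_ definition above) =====
theorem calculate_ignore_spec : Claim_equal_calculate_ignore := by
  intro defines constraints _
  unfold Spec_calculate_ignore calculate_ignore calculate_ignore_alt
  exact pvCalcALoop_eq_setalg defines constraints
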